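-- pv_equiv track=rewrite | github.com/luiscarlosgarzacisneros/EFInformatik | docs/Dame3.py | evaluatepos
-- ===== SOURCE A (Python) =====
-- def evaluatepos(pos):
--     eval=0
--     for sl in range(len(pos)):
--         for o in range(pos[sl].count(1)):
--             eval=eval+1
--         for o in range(pos[sl].count(-1)):
--             eval=eval-1
--         for o in range(pos[sl].count(2)):
--             eval=eval+15
--         for o in range(pos[sl].count(-2)):
--             eval=eval-5
--     if verloren(pos,1,2):
--         eval=eval-8888
--     if verloren(pos,-1,-2):
--         eval=eval+8888
--     return eval
--
-- def verloren(pos,otherplayer1, otherplayer2):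
--     eval=0
--     for sl in range(len(pos)):
--         for o in range(pos[sl].count(otherplayer1)):
--             eval=eval+1
--         for p in range(pos[sl].count(otherplayer2)):
--             eval=eval+1
--     if eval==0:
--         return True
--     else:
--         return False
-- ===== SOURCE B (Python) =====
-- def evaluatepos(pos):
--     # One fused pass maintaining (score, white_alive, black_alive) together,
--     # instead of staged per-row count scans plus two full-board recounts.
--     score = 0
--     white_alive = False
--     black_alive = False
--     for row in pos:
--         for c in row:
--             if c == 1:
--                 score += 1
--                 white_alive = True
--             elif c == -1:
--                 score -= 1
--                 black_alive = True
--             elif c == 2: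
--                 score += 15
--                 white_alive = True
--             elif c == -2:
--                 score -= 5
--                 black_alive = True
--     if not white_alive:
--         score -= 8888
--     if not black_alive:
--         score += 8888
--     return score
-- ===== Notes on version B (the rewrite author's own statement) =====
-- stated objective: faster
-- what changed: A makes ~8 staged scans over the board (four .count passes per row plus two verloren() full recounts); B is one fused pass whose accumulator carries the score together with two liveness flags, so the ±8888 endgame adjustments need no further traversal.
import Mathlib
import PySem

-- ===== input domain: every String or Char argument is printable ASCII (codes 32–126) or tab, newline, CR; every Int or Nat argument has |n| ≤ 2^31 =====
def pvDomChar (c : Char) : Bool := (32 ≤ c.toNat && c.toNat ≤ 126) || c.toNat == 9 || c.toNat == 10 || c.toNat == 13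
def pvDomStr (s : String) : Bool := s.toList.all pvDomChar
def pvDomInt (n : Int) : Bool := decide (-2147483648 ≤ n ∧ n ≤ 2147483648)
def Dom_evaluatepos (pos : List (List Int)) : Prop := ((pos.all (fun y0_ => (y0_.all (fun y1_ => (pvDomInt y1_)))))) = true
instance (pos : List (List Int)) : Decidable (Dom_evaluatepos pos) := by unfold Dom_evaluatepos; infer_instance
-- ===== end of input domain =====

-- B replaces A's staged count scans and the two verloren() full-board recounts by one
-- fused pass carrying (score, white_alive, black_alive); objective: alternative.

-- ===== PORT A =====
-- helper verloren(pos, otherplayer1, otherplayer2), transliterated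
def verloren (pos : List (List Int)) (otherplayer1 otherplayer2 : Int) : Bool :=
  let eval : Int := pos.foldl (fun eval sl =>
    let eval := (PySem.List.pyRange 0 (PySem.List.count sl otherplayer1 : Int) 1).foldl
      (fun eval _ => eval + 1) eval
    (PySem.List.pyRange 0 (PySem.List.count sl otherplayer2 : Int) 1).foldl
      (fun eval _ => eval + 1) eval) 0
  if eval == 0 then true else false

def evaluatepos (pos : List (List Int)) : Int :=
  let eval : Int := pos.foldl (fun eval sl =>
    let eval := (PySem.List.pyRange 0 (PySem.List.count sl 1 : Int) 1).foldl
      (fun eval _ => eval + 1) eval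
    let eval := (PySem.List.pyRange 0 (PySem.List.count sl (-1) : Int) 1).foldl
      (fun eval _ => eval - 1) eval
    let eval := (PySem.List.pyRange 0 (PySem.List.count sl 2 : Int) 1).foldl
      (fun eval _ => eval + 15) eval
    (PySem.List.pyRange 0 (PySem.List.count sl (-2) : Int) 1).foldl
      (fun eval _ => eval - 5) eval) 0
  let eval := if verloren pos 1 2 then eval - 8888 else eval
  if verloren pos (-1) (-2) then eval + 8888 else eval

-- ===== PORT B =====
-- the fused per-cell step of Source B's inner loop: update score and the two liveness flags
def pvStep (st : Int × Bool × Bool) (c : Int) : Int × Bool × Bool :=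
  let (s, w, b) := st
  if c = 1 then (s + 1, true, b)
  else if c = -1 then (s - 1, w, true)
  else if c = 2 then (s + 15, true, b)
  else if c = -2 then (s - 5, w, true)
  else (s, w, b)

def evaluatepos_alt (pos : List (List Int)) : Int :=
  let st : Int × Bool × Bool :=
    pos.foldl (fun st row => row.foldl pvStep st) (0, false, false)
  let (s, w, b) := st
  let s := if !w then s - 8888 else s
  if !b then s + 8888 else s

-- ===== PRECONDITION & SPEC =====
def Spec_evaluatepos (pos : List (List Int)) (out : Int) : Prop := out = evaluatepos_alt pos
instance (pos : List (List Int)) (out : Int) : Decidable (Spec_evaluatepos pos out) := by unfold Spec_evaluatepos; infer_instance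

-- ===== CLAIM (what is proved, stated in full; the proofs are below) =====
def Claim_equal_evaluatepos : Prop := ∀ (pos : List (List Int)), Dom_evaluatepos pos → Spec_evaluatepos pos (evaluatepos pos)

-- ===== LEMMAS AND PROOFS =====

-- weight of one cell (proof-only abbreviation for the score delta of pvStep)
def pvWeight (c : Int) : Int :=
  if c = 1 then 1 else if c = -1 then -1 else if c = 2 then 15 else if c = -2 then -5 else 0

-- a for-loop over range(n) adding k each time adds k*n
theorem foldl_const_add (l : List Int) (k e : Int) :
    l.foldl (fun a _ => a + k) e = e + k * l.length := by
  induction l generalizing e with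
  | nil => simp
  | cons x xs ih => simp [List.foldl, ih]; ring

theorem foldl_range_count (row : List Int) (v k e : Int) :
    (PySem.List.pyRange 0 (PySem.List.count row v : Int) 1).foldl (fun a _ => a + k) e
      = e + k * (PySem.List.count row v : Int) := by
  rw [foldl_const_add]
  simp [PySem.List.length_pyRange_one]

-- per-cell weight sum over a row equals the count-weighted expression
theorem row_weight_sum (row : List Int) (e : Int) :
    row.foldl (fun s c => s + pvWeight c) e
      = e + (PySem.List.count row 1 : Int) - (PySem.List.count row (-1) : Int)
          + 15 * (PySem.List.count row 2 : Int) - 5 * (PySem.List.count row (-2) : Int) := by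
  induction row generalizing e with
  | nil => simp [PySem.List.count]
  | cons c cs ih =>
    simp only [List.foldl_cons, ih, PySem.List.count_eq, List.count_cons] at *
    by_cases h1 : c = 1 <;> by_cases h2 : c = -1 <;> by_cases h3 : c = 2 <;> by_cases h4 : c = -2 <;>
      simp [pvWeight, h1, h2, h3, h4] at * <;> ring

-- A's accumulating sum equals a flat weight-sum pass
theorem sum_eq (pos : List (List Int)) (e : Int) :
    pos.foldl (fun eval sl =>
      let eval := (PySem.List.pyRange 0 (PySem.List.count sl 1 : Int) 1).foldl
        (fun eval _ => eval + 1) eval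
      let eval := (PySem.List.pyRange 0 (PySem.List.count sl (-1) : Int) 1).foldl
        (fun eval _ => eval - 1) eval
      let eval := (PySem.List.pyRange 0 (PySem.List.count sl 2 : Int) 1).foldl
        (fun eval _ => eval + 15) eval
      (PySem.List.pyRange 0 (PySem.List.count sl (-2) : Int) 1).foldl
        (fun eval _ => eval - 5) eval) e
    = (pos.flatMap id).foldl (fun s c => s + pvWeight c) e := by
  induction pos generalizing e with
  | nil => simp
  | cons row rest ih =>
    simp only [List.foldl_cons, List.flatMap_cons, List.foldl_append, id]
    rw [ih]
    congr 1
    have h1 := foldl_range_count row 1 1 e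
    have hm1 := foldl_range_count row (-1) (-1)
    have h2 := foldl_range_count row 2 15
    have hm2 := foldl_range_count row (-2) (-5)
    simp only [show ∀ (a k : Int), a - k = a + (-k) from fun a k => by ring] at *
    rw [h1, hm1, h2, hm2, row_weight_sum]
    ring

-- verloren's count is zero exactly when no cell equals either player value
theorem verloren_eq (pos : List (List Int)) (o1 o2 : Int) :
    verloren pos o1 o2 = !(pos.flatMap id).any (fun c => c == o1 || c == o2) := by
  unfold verloren
  have key : ∀ e : Int, 0 ≤ e →
      (pos.foldl (fun eval sl =>
        let eval := (PySem.List.pyRange 0 (PySem.List.count sl o1 : Int) 1).foldl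
          (fun eval _ => eval + 1) eval
        (PySem.List.pyRange 0 (PySem.List.count sl o2 : Int) 1).foldl
          (fun eval _ => eval + 1) eval) e = 0
        ↔ e = 0 ∧ ∀ c ∈ pos.flatMap id, c ≠ o1 ∧ c ≠ o2) := by
    induction pos with
    | nil => simp
    | cons row rest ih =>
      intro e he
      simp only [List.foldl_cons]
      rw [foldl_range_count, foldl_range_count]
      have hcnt1 : (0:Int) ≤ (PySem.List.count row o1 : Int) := by positivity
      have hcnt2 : (0:Int) ≤ (PySem.List.count row o2 : Int) := by positivity
      rw [ih _ (by omega)]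
      simp only [List.flatMap_cons, List.mem_append, id]
      constructor
      · rintro ⟨hz, hrest⟩
        have hc1 : PySem.List.count row o1 = 0 := by omega
        have hc2 : PySem.List.count row o2 = 0 := by omega
        simp only [PySem.List.count_eq, List.count_eq_zero] at hc1 hc2
        refine ⟨by omega, ?_⟩
        intro c hc
        rcases hc with hc | hc
        · exact ⟨fun h => hc1 (h ▸ hc), fun h => hc2 (h ▸ hc)⟩
        · exact hrest c hc
      · rintro ⟨he0, hall⟩
        have hc1 : List.count o1 row = 0 :=
          List.count_eq_zero.mpr fun h => (hall o1 (Or.inl h)).1 rfl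
        have hc2 : List.count o2 row = 0 :=
          List.count_eq_zero.mpr fun h => (hall o2 (Or.inl h)).2 rfl
        refine ⟨by simp [PySem.List.count_eq, hc1, hc2, he0], fun c hc => hall c (Or.inr hc)⟩
  by_cases ha : (pos.flatMap id).any (fun c => c == o1 || c == o2) = true
  · rw [ha]
    obtain ⟨c, hc, hor⟩ := List.any_eq_true.mp ha
    simp only [beq_iff_eq, Bool.not_true]
    split
    · exfalso
      have h2 := ((key 0 le_rfl).mp (by assumption)).2 c hc
      rcases (show c = o1 ∨ c = o2 by simpa using hor) with h' | h'
      · exact h2.1 h'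
      · exact h2.2 h'
    · rfl
  · rw [Bool.not_eq_true] at ha
    rw [ha]
    have hall : ∀ x ∈ pos.flatMap id, x ≠ o1 ∧ x ≠ o2 := by
      intro x hx
      cases hb : (x == o1 || x == o2) with
      | false => constructor <;> rintro rfl <;> simp at hb
      | true =>
        have htrue : (pos.flatMap id).any (fun c => c == o1 || c == o2) = true :=
          List.any_eq_true.mpr ⟨x, hx, hb⟩
        rw [ha] at htrue
        exact absurd htrue Bool.false_ne_true
    have h0 := (key 0 le_rfl).mpr ⟨rfl, hall⟩
    simp only [beq_iff_eq, Bool.not_false]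
    split
    · rfl
    · exact absurd h0 (by assumption)

-- one fused pvStep pass over a cell list computes (weight sum, liveness flags)
theorem step_fold (l : List Int) (s : Int) (w b : Bool) :
    l.foldl pvStep (s, w, b)
      = (l.foldl (fun s c => s + pvWeight c) s,
         w || l.any (fun c => c == 1 || c == 2),
         b || l.any (fun c => c == -1 || c == -2)) := by
  induction l generalizing s w b with
  | nil => simp
  | cons c cs ih =>
    simp only [List.foldl_cons, List.any_cons]
    by_cases h1 : c = 1 <;> by_cases h2 : c = -1 <;> by_cases h3 : c = 2 <;> by_cases h4 : c = -2 <;>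
      simp [pvStep, pvWeight, h1, h2, h3, h4, ih, Bool.or_assoc, sub_eq_add_neg]
    exact ⟨by simp [show (c == 1) = false by simp [h1], show (c == 2) = false by simp [h3]],
           by simp [show (c == -1) = false by simp [h2], show (c == -2) = false by simp [h4]]⟩

-- the nested row/cell fold is the flat fold over all cells
theorem nested_fold (pos : List (List Int)) (st : Int × Bool × Bool) :
    pos.foldl (fun st row => row.foldl pvStep st) st
      = (pos.flatMap id).foldl pvStep st := by
  induction pos generalizing st with
  | nil => rfl
  | cons row rest ih => simp [List.foldl_append, ih]

-- ===== VERDICT (by name: the statement is the Claim_ definition above) =====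
theorem evaluatepos_spec : Claim_equal_evaluatepos := by
  intro pos _
  unfold Spec_evaluatepos evaluatepos evaluatepos_alt
  rw [sum_eq, verloren_eq, verloren_eq, nested_fold, step_fold]
  simp
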